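-- pv_equiv track=rewrite | github.com/noakmilo/qventory | qventory/helpers/utils.py | parse_location_code
-- ===== SOURCE A (Python) =====
-- def parse_location_code(code):
--     result = {}
--     if not code: return result
--     i = 0
--     current_key = None
--     current_val = []
--     while i < len(code):
--         ch = code[i]
--         if ch in "ABSC":
--             if current_key:
--                 result[current_key] = "".join(current_val).strip() or None
--                 current_val = []
--             current_key = ch
--         else:
--             current_val.append(ch)
--         i += 1
--     if current_key:
--         result[current_key] = "".join(current_val).strip() or None
--     return result
-- ===== SOURCE B (Python) =====
-- import re
--
-- def parse_location_code(code):
--     if not code: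
--         return {}
--     # re.split with a captured marker group tokenizes the string once:
--     # [head, m1, v1, m2, v2, ...]; the head (text before the first marker)
--     # belongs to the first marker's value, as in the original parser.
--     head, *rest = re.split(r'([ABSC])', code)
--     result = {}
--     for key, val in zip(rest[::2], rest[1::2]):
--         result[key] = (head + val).strip() or None
--         head = ""
--     return result
-- ===== Notes on version B (the rewrite author's own statement) =====
-- stated objective: idiomatic
-- what changed: Replaces the manual character-by-character state machine (index loop with current_key/current_val accumulators) by a one-shot re.split tokenization into marker+payload pairs assigned into the dict in a single zip loop.
import Mathlib
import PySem

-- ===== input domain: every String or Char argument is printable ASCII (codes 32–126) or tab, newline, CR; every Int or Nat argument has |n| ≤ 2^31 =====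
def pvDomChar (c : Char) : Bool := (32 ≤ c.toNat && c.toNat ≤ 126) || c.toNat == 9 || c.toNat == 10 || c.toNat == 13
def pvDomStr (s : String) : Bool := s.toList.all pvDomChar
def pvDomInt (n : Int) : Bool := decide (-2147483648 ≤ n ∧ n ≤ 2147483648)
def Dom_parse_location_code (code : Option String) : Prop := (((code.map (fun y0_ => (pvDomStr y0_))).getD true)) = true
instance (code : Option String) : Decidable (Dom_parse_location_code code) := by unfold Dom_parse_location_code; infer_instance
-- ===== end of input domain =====

-- B replaces A's character-by-character state machine by a one-shot regex-split
-- tokenization into marker+payload segments (objective: idiomatic; same cost).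

-- ch in "ABSC" for a single character ch is exactly membership in its characters
def pvIsMarker (c : Char) : Bool := ['A', 'B', 'S', 'C'].contains c

-- "".join(val).strip() or None  (strip is PySem.Chars.strip; '' is falsy → None)
def pvNorm (val : List Char) : Option String :=
  let t := PySem.Chars.strip val
  if t.isEmpty then none else some (String.ofList t)

-- ===== PORT A =====
-- the while-loop of A over (result, current_key, current_val), step for step
def pvLoopA (cs : List Char) (res : PySem.Dict String (Option String))
    (key : Option Char) (val : List Char) : PySem.Dict String (Option String) :=
  match cs with
  | [] =>
    match key with
    | none => res
    | some k => res.insert (String.ofList [k]) (pvNorm val)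
  | c :: rest =>
    if pvIsMarker c then
      match key with
      | none => pvLoopA rest res (some c) val
      | some k => pvLoopA rest (res.insert (String.ofList [k]) (pvNorm val)) (some c) []
    else pvLoopA rest res key (val ++ [c])

def parse_location_code (code : Option String) : List (String × Option String) :=
  match code with
  | none => []
  | some s =>
    if s = "" then []
    else (pvLoopA s.toList PySem.Dict.empty none []).items

-- ===== PORT B =====
-- hand port of re.split(r'([ABSC])', code) zipped into (marker, payload) pairs:
-- the input after its markerless head is exactly marker+payload segments; exact
-- for this pattern (single-char alternation, no empty matches).
def pvSegs (cs : List Char) : List (Char × List Char) :=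
  match cs with
  | [] => []
  | c :: rest =>
    (c, rest.takeWhile (fun x => !pvIsMarker x)) ::
      pvSegs (rest.dropWhile (fun x => !pvIsMarker x))
termination_by cs.length
decreasing_by
  simpa using Nat.lt_succ_of_le (List.length_dropWhile_le _ _)

-- B's for-loop: assign each pair, gluing the head onto the first value only
def pvGoB (head : List Char) (toks : List (Char × List Char))
    (d : PySem.Dict String (Option String)) : PySem.Dict String (Option String) :=
  match toks with
  | [] => d
  | (k, v) :: ts => pvGoB [] ts (d.insert (String.ofList [k]) (pvNorm (head ++ v)))

def parse_location_code_alt (code : Option String) : List (String × Option String) :=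
  match code with
  | none => []
  | some s =>
    if s = "" then []
    else
      (pvGoB (s.toList.takeWhile (fun x => !pvIsMarker x))
        (pvSegs (s.toList.dropWhile (fun x => !pvIsMarker x)))
        PySem.Dict.empty).items

-- ===== PRECONDITION & SPEC =====
def Spec_parse_location_code (code : Option String) (out : List (String × Option String)) : Prop := out = parse_location_code_alt code
instance (code : Option String) (out : List (String × Option String)) : Decidable (Spec_parse_location_code code out) := by unfold Spec_parse_location_code; infer_instance

-- ===== CLAIM (what is proved, stated in full; the proofs are below) =====
def Claim_equal_parse_location_code : Prop := ∀ (code : Option String), Dom_parse_location_code code → Spec_parse_location_code code (parse_location_code code)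

-- ===== LEMMAS AND PROOFS =====

-- with a pending key k, A flushes k with val plus the next markerless run,
-- then proceeds exactly as B does on the remaining segments
theorem pvLoopA_some (cs : List Char) (res : PySem.Dict String (Option String))
    (k : Char) (val : List Char) :
    pvLoopA cs res (some k) val =
      pvGoB [] (pvSegs (cs.dropWhile (fun x => !pvIsMarker x)))
        (res.insert (String.ofList [k]) (pvNorm (val ++ cs.takeWhile (fun x => !pvIsMarker x)))) := by
  induction cs generalizing res k val with
  | nil => simp [pvLoopA, pvSegs, pvGoB]
  | cons c rest ih =>
    by_cases hc : pvIsMarker c = true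
    · simp [pvLoopA, hc, ih, pvSegs, pvGoB]
    · simp [pvLoopA, hc, ih]

-- with no pending key, A's accumulated val is the head B glues onto the first value
theorem pvLoopA_none (cs : List Char) (res : PySem.Dict String (Option String))
    (val : List Char) :
    pvLoopA cs res none val =
      pvGoB (val ++ cs.takeWhile (fun x => !pvIsMarker x))
        (pvSegs (cs.dropWhile (fun x => !pvIsMarker x))) res := by
  induction cs generalizing res val with
  | nil => simp [pvLoopA, pvSegs, pvGoB]
  | cons c rest ih =>
    by_cases hc : pvIsMarker c = true
    · simp [pvLoopA, hc, pvSegs, pvGoB, pvLoopA_some]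
    · simp [pvLoopA, hc, ih]

-- ===== VERDICT (by name: the statement is the Claim_ definition above) =====
theorem parse_location_code_spec : Claim_equal_parse_location_code := by
  intro code _
  unfold Spec_parse_location_code parse_location_code parse_location_code_alt
  match code with
  | none => rfl
  | some s =>
    by_cases hs : s = ""
    · simp [hs]
    · simp [hs, pvLoopA_none]
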